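-- pv_equiv track=rewrite | github.com/TheFoxKD/mtuci-antiplagiarism | src/text_normalize.py | text_to_shingles
-- ===== SOURCE A (Python) =====
-- def text_to_shingles(text: str, shingle_size: int) -> set[str]:
--     """Множество словесных шинглов."""
--     words = text.split()
--     if shingle_size < 1:
--         raise ValueError("shingle_size >= 1")
--     if len(words) < shingle_size:
--         return {" ".join(words)} if words else set()
--     return {
--         " ".join(words[i : i + shingle_size])
--         for i in range(len(words) - shingle_size + 1)
--     }
-- ===== SOURCE B (Python) =====
-- def text_to_shingles(text: str, shingle_size: int) -> set[str]:
--     """Shingles as substrings of the single joined text, cut at precomputed word offsets."""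
--     words = text.split()
--     if shingle_size < 1:
--         raise ValueError("shingle_size >= 1")
--     joined = " ".join(words)
--     if len(words) < shingle_size:
--         return {joined} if words else set()
--     starts, pos = [], 0
--     for w in words:
--         starts.append(pos)
--         pos += len(w) + 1
--     starts.append(pos)
--     return {joined[a : b - 1] for a, b in zip(starts, starts[shingle_size:])}
-- ===== Notes on version B (the rewrite author's own statement) =====
-- stated objective: alternative
-- what changed: B joins the words once into a single string, precomputes the character offset of every word in one accumulator pass, and cuts each shingle out as a substring joined[start:end] between two offsets, instead of re-joining a fresh word slice for every window position.
import Mathlib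
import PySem

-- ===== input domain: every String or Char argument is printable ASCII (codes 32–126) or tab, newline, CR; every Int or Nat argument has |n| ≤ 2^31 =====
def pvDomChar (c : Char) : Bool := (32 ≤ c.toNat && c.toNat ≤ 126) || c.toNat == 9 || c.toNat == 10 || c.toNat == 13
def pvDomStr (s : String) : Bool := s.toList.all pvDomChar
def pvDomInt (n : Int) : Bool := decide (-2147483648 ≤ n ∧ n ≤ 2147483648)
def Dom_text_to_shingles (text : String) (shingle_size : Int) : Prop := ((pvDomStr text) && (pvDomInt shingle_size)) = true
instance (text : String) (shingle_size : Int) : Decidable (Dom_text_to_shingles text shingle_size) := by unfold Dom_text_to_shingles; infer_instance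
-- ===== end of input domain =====

-- B cuts each shingle as a substring of the single joined text at precomputed word offsets, instead of joining each window separately; objective: alternative.


-- ===== PORT A =====
def text_to_shingles (text : String) (shingle_size : Int) : List String :=
  let words := PySem.Str.split₀ text
  if shingle_size < 1 then []  -- raise ValueError: excluded by Pre_
  else if (words.length : Int) < shingle_size then
    if words = [] then PySem.Set.empty else PySem.Set.ofList [PySem.Str.join " " words]
  else
    PySem.Set.ofList ((PySem.List.pyRange 0 ((words.length : Int) - shingle_size + 1) 1).map
      (fun i => PySem.Str.join " " (PySem.List.slice words (some i) (some (i + shingle_size)))))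

-- ===== PORT B =====
def text_to_shingles_alt (text : String) (shingle_size : Int) : List String :=
  let words := PySem.Str.split₀ text
  if shingle_size < 1 then []  -- raise ValueError: excluded by Pre_
  else
    let joined := PySem.Str.join " " words
    if (words.length : Int) < shingle_size then
      if words = [] then PySem.Set.empty else PySem.Set.ofList [joined]
    else
      -- the for-loop accumulating (starts, pos), then the final starts.append(pos)
      let sp := words.foldl (fun (st : List Int × Int) w =>
          (st.1 ++ [st.2], st.2 + PySem.Str.len w + 1)) (([] : List Int), (0 : Int))
      let starts := sp.1 ++ [sp.2]
      PySem.Set.ofList ((starts.zip (PySem.List.slice starts (some shingle_size) none)).map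
        (fun ab => PySem.Str.slice joined (some ab.1) (some (ab.2 - 1))))

-- ===== PRECONDITION & SPEC =====
-- Pre_ excludes exactly shingle_size < 1, where the Python A raises ValueError.
def Pre_text_to_shingles (text : String) (shingle_size : Int) : Prop := 1 ≤ shingle_size
instance (text : String) (shingle_size : Int) : Decidable (Pre_text_to_shingles text shingle_size) := by
  unfold Pre_text_to_shingles; infer_instance
def pvWitness_text_to_shingles : String × Int := ("a b c", 2)
def Spec_text_to_shingles (text : String) (shingle_size : Int) (out : List String) : Prop := out = text_to_shingles_alt text shingle_size
instance (text : String) (shingle_size : Int) (out : List String) : Decidable (Spec_text_to_shingles text shingle_size out) := by unfold Spec_text_to_shingles; infer_instance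

-- ===== CLAIM (what is proved, stated in full; the proofs are below) =====
def Claim_equal_text_to_shingles : Prop := ∀ (text : String) (shingle_size : Int), Dom_text_to_shingles text shingle_size → Pre_text_to_shingles text shingle_size → Spec_text_to_shingles text shingle_size (text_to_shingles text shingle_size)

-- ===== LEMMAS AND PROOFS =====

-- character offset of word i in the join: total length (word + one separator) of the first i words
def pvOff (wls : List (List Char)) (i : Nat) : Nat :=
  ((wls.take i).map (fun w => w.length + 1)).sum

theorem pvOff_cons_succ (w : List Char) (t : List (List Char)) (i : Nat) :
    pvOff (w :: t) (i + 1) = (w.length + 1) + pvOff t i := by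
  simp [pvOff, List.take_succ_cons]

theorem pvOff_add (wls : List (List Char)) (i k : Nat) :
    pvOff wls (i + k) = pvOff wls i + pvOff (wls.drop i) k := by
  induction wls generalizing i with
  | nil => simp [pvOff]
  | cons w t ih =>
    cases i with
    | zero => simp [pvOff]
    | succ i =>
      have h : i + 1 + k = (i + k) + 1 := by omega
      rw [h, pvOff_cons_succ, pvOff_cons_succ, ih]
      simp; omega

theorem pvOff_pos (wls : List (List Char)) (k : Nat) (h1 : 1 ≤ k) (h2 : k ≤ wls.length) :
    1 ≤ pvOff wls k := by
  cases wls with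
  | nil => simp at h2; omega
  | cons w t =>
    cases k with
    | zero => omega
    | succ k => rw [pvOff_cons_succ]; omega

-- the foldl in B computes exactly the offsets list
theorem pvFoldl_starts (ws : List String) (acc : List Int) (p : Int) :
    ws.foldl (fun (st : List Int × Int) w =>
        (st.1 ++ [st.2], st.2 + PySem.Str.len w + 1)) (acc, p) =
      (acc ++ (List.range ws.length).map (fun i => p + (pvOff (ws.map String.toList) i : Int)),
       p + (pvOff (ws.map String.toList) ws.length : Int)) := by
  induction ws generalizing acc p with
  | nil => simp [pvOff]
  | cons w t ih =>
    simp only [List.foldl_cons, ih]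
    rw [Prod.mk.injEq]
    constructor
    · rw [List.length_cons, List.range_succ_eq_map]
      rw [List.map_cons, List.map_map, List.append_assoc]
      congr 1
      · simp [pvOff]
        intro a _
        ring
    · simp only [List.map_cons, List.length_cons, pvOff_cons_succ, PySem.Str.len_eq]
      push_cast; ring

-- dropping pvOff i characters from the join removes the first i words with their separators
theorem pvJoin_drop (i : Nat) : ∀ (wls : List (List Char)), i < wls.length →
    (PySem.Chars.join [' '] wls).drop (pvOff wls i) =
      PySem.Chars.join [' '] (wls.drop i) := by
  induction i with
  | zero => intro wls _; simp [pvOff]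
  | succ i ih =>
    intro wls h
    match wls with
    | [] => simp at h
    | w :: u :: t' =>
      rw [PySem.Chars.join_cons_cons, pvOff_cons_succ]
      have hl : w.length + 1 + pvOff (u :: t') i = (w ++ [' ']).length + pvOff (u :: t') i := by
        simp
      rw [hl, List.drop_length_add_append]
      exact ih (u :: t') (by simpa using h)

-- taking pvOff k - 1 characters of the join yields the join of the first k words
theorem pvJoin_take (k : Nat) : ∀ (wls : List (List Char)), 1 ≤ k → k ≤ wls.length →
    (PySem.Chars.join [' '] wls).take (pvOff wls k - 1) =
      PySem.Chars.join [' '] (wls.take k) := by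
  induction k with
  | zero => intro wls h1 _; omega
  | succ k ih =>
    intro wls _ h2
    match wls with
    | [] => simp at h2
    | w :: t =>
      cases Nat.eq_zero_or_pos k with
      | inl hk0 =>
        subst hk0
        rw [pvOff_cons_succ]
        have : pvOff t 0 = 0 := rfl
        rw [this]
        match t with
        | [] =>
          simp [PySem.Chars.join_singleton]
        | u :: t' =>
          rw [PySem.Chars.join_cons_cons]
          rw [show w.length + 1 + 0 - 1 = w.length + 0 by omega,
              show w.length + 0 = w.length + 0 + 0 by omega,
              show w.length + 0 + 0 = (w.take (w.length)).length + 0 by simp]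
          rw [show (w ++ [' '] ++ PySem.Chars.join [' '] (u :: t')) = w ++ ([' '] ++ PySem.Chars.join [' '] (u :: t')) by simp,
              show (w.take w.length).length + 0 = w.length + 0 by simp]
          rw [show w.length + 0 = w.length + 0 by rfl]
          rw [show (w ++ ([' '] ++ PySem.Chars.join [' '] (u :: t'))).take (w.length + 0) = w ++ ([' '] ++ PySem.Chars.join [' '] (u :: t')).take 0 by
                rw [show w.length + 0 = w.length + 0 by rfl]; exact List.take_length_add_append 0]
          simp [PySem.Chars.join_singleton]
      | inr hk1 =>
        have ht : k ≤ t.length := by simp at h2; omega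
        match t with
        | [] => simp at ht; omega
        | u :: t' =>
          have hpos : 1 ≤ pvOff (u :: t') k := pvOff_pos _ k hk1 ht
          rw [PySem.Chars.join_cons_cons, pvOff_cons_succ]
          rw [show w.length + 1 + pvOff (u :: t') k - 1
              = (w ++ [' ']).length + (pvOff (u :: t') k - 1) by simp; omega]
          rw [show (w ++ [' '] ++ PySem.Chars.join [' '] (u :: t')) = (w ++ [' ']) ++ PySem.Chars.join [' '] (u :: t') by rfl]
          rw [List.take_length_add_append]
          have htake : (u :: t').take k = u :: t'.take (k - 1) := by
            cases k with
            | zero => omega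
            | succ k => simp [List.take_succ_cons]
          rw [ih (u :: t') hk1 ht, List.take_succ_cons, htake,
              PySem.Chars.join_cons_cons]

-- zip of an offsets-over-range list with its own drop, as a single map over a range
theorem pvZip_range_map {α : Type} (g : Nat → α) (m K : Nat) (hK : K ≤ m) :
    (((List.range m).map g).zip (((List.range m).map g).drop K)) =
      (List.range (m - K)).map (fun i => (g i, g (i + K))) := by
  apply List.ext_getElem
  · rw [List.length_zip, List.length_drop]
    simp only [List.length_map, List.length_range]
    omega
  · intro i h1 h2
    rw [List.getElem_zip]
    simp only [List.getElem_drop, List.getElem_map, List.getElem_range]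
    rw [Nat.add_comm K i]

-- one shingle: the substring between two offsets equals the join of the k-word window
theorem pvShingle_eq (ws : List String) (i K : Nat) (hK1 : 1 ≤ K)
    (hiK : i + K ≤ ws.length) :
    PySem.Str.slice (PySem.Str.join " " ws)
        (some (pvOff (ws.map String.toList) i : Int))
        (some ((pvOff (ws.map String.toList) (i + K) : Int) - 1)) =
      PySem.Str.join " " ((ws.drop i).take K) := by
  apply String.toList_inj.mp
  rw [PySem.Str.toList_slice, PySem.Chars.slice_eq_listSlice, PySem.Str.toList_join,
      PySem.Str.toList_join]
  rw [show " ".toList = [' '] from rfl]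
  set wls := ws.map String.toList with hwls
  have hlen : wls.length = ws.length := by simp [hwls]
  have hpos : 1 ≤ pvOff wls (i + K) := pvOff_pos wls (i + K) (by omega) (by omega)
  rw [show ((pvOff wls (i + K) : Int) - 1) = ((pvOff wls (i + K) - 1 : Nat) : Int) by omega]
  rw [PySem.List.slice_natCast]
  have hi : i < wls.length := by omega
  rw [pvJoin_drop i wls hi]
  have hoff : pvOff wls (i + K) - 1 - pvOff wls i = pvOff (wls.drop i) K - 1 := by
    rw [pvOff_add]; omega
  rw [hoff, pvJoin_take K (wls.drop i) hK1 (by simp [hlen]; omega)]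
  congr 1
  simp [hwls, List.map_drop, List.map_take]

theorem text_to_shingles_spec_aux (text : String) (shingle_size : Int)
    (hpre : 1 ≤ shingle_size) :
    text_to_shingles text shingle_size = text_to_shingles_alt text shingle_size := by
  unfold text_to_shingles text_to_shingles_alt
  set ws := PySem.Str.split₀ text with hws
  have hns : ¬ shingle_size < 1 := by omega
  simp only [hns, if_false]
  by_cases hshort : (ws.length : Int) < shingle_size
  · simp [hshort]
  · simp only [hshort, if_false]
    set K := shingle_size.toNat with hK
    have hkc : shingle_size = (K : Int) := by omega
    have hk1 : 1 ≤ K := by omega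
    have hkn : K ≤ ws.length := by omega
    congr 1
    rw [pvFoldl_starts]
    simp only [List.nil_append, zero_add]
    have hstarts : (List.range ws.length).map (fun i => ((pvOff (ws.map String.toList) i : Nat) : Int))
        ++ [((pvOff (ws.map String.toList) ws.length : Nat) : Int)]
        = (List.range (ws.length + 1)).map (fun i => ((pvOff (ws.map String.toList) i : Nat) : Int)) := by
      rw [List.range_succ, List.map_append]; rfl
    rw [hstarts, hkc, PySem.List.slice_from_natCast,
        pvZip_range_map (fun i => ((pvOff (ws.map String.toList) i : Nat) : Int)) (ws.length + 1) K (by omega),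
        List.map_map]
    have hA : ((ws.length : Int) - (K : Int) + 1) = ((ws.length + 1 - K : Nat) : Int) := by omega
    rw [hA, PySem.List.pyRange_one]
    rw [show (((ws.length + 1 - K : Nat) : Int) - 0).toNat = ws.length + 1 - K by omega]
    rw [List.map_map]
    apply List.map_congr_left
    intro i hi
    have hiK : i + K ≤ ws.length := by
      have := List.mem_range.1 hi; omega
    simp only [Function.comp_apply, zero_add]
    rw [PySem.List.slice_natCast_add]
    rw [← pvShingle_eq ws i K hk1 hiK]

-- ===== VERDICT (by name: the statement is the Claim_ definition above) =====
theorem text_to_shingles_spec : Claim_equal_text_to_shingles := by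
  intro text shingle_size _ hpre
  unfold Spec_text_to_shingles
  exact text_to_shingles_spec_aux text shingle_size hpre
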